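-- pv_equiv track=rewrite | github.com/teo000/PythonLabs | Lab2/main.py | palindrome_count_max
-- ===== SOURCE A (Python) =====
-- def is_palindrome(number):
--     return str(number) == str(number)[::-1]
--
-- def palindrome_count_max(numbers):
--     palindrome_list = []
--     max_palindrome = -1
--     for number in numbers:
--         if is_palindrome(number):
--             palindrome_list.append(number)
--             if number > max_palindrome:
--                 max_palindrome = number
--     if max_palindrome == -1:
--         return tuple(([], None))
--     return tuple((palindrome_list, max_palindrome))
-- ===== SOURCE B (Python) =====
-- def palindrome_count_max(numbers):
--     pals = [n for n in numbers if str(n) == str(n)[::-1]]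
--     if not pals:
--         return ([], None)
--     return (pals, sorted(pals, reverse=True)[0])
-- ===== Notes on version B (the rewrite author's own statement) =====
-- stated objective: alternative
-- what changed: Replaces the fused loop with its -1 running-max sentinel by a filter pass followed by selection-by-sorting: the maximum is the head of the descending-sorted palindrome list, so no running max and no sentinel exist in B.
import Mathlib
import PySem

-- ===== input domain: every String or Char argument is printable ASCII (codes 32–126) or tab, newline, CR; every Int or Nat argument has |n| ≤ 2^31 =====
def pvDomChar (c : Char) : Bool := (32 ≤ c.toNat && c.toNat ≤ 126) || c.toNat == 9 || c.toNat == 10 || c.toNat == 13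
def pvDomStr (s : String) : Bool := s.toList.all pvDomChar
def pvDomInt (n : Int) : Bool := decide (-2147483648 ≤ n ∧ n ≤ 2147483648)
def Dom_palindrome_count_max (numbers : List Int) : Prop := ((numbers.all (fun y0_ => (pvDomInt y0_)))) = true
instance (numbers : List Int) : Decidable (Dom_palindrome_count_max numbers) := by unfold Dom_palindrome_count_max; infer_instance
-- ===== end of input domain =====

-- B replaces A's fused loop with its -1 running-max sentinel by a filter pass followed by
-- selection-by-sorting: the maximum is the head of the descending-sorted palindrome list
-- (objective: alternative).

-- ===== PORT A =====
-- helper is_palindrome: str(number) == str(number)[::-1]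
def is_palindrome (number : Int) : Bool :=
  some (PySem.Int.toStr number) == PySem.Str.slice? (PySem.Int.toStr number) none none (-1)

def palindrome_count_max (numbers : List Int) : List Int × Option Int :=
  let st := numbers.foldl (fun (st : List Int × Int) number =>
    if is_palindrome number then
      let pl := st.1 ++ [number]
      if number > st.2 then (pl, number) else (pl, st.2)
    else st) ([], -1)
  if st.2 == -1 then ([], none) else (st.1, some st.2)

-- ===== PORT B =====
def palindrome_count_max_alt (numbers : List Int) : List Int × Option Int :=
  let pals := numbers.filter (fun n =>
    some (PySem.Int.toStr n) == PySem.Str.slice? (PySem.Int.toStr n) none none (-1))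
  match pals with
  | [] => ([], none)
  | _ :: _ => (pals, PySem.List.pyGet? (PySem.List.sorted pals (fun x => x) true) 0)

-- ===== PRECONDITION & SPEC =====
def Spec_palindrome_count_max (numbers : List Int) (out : List Int × Option Int) : Prop := out = palindrome_count_max_alt numbers
instance (numbers : List Int) (out : List Int × Option Int) : Decidable (Spec_palindrome_count_max numbers out) := by unfold Spec_palindrome_count_max; infer_instance

-- ===== CLAIM (what is proved, stated in full; the proofs are below) =====
def Claim_equal_palindrome_count_max : Prop := ∀ (numbers : List Int), Dom_palindrome_count_max numbers → Spec_palindrome_count_max numbers (palindrome_count_max numbers)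

-- ===== LEMMAS AND PROOFS =====

-- every character emitted by Nat.toDigitsCore beyond the accumulator is a digit char
lemma mem_toDigitsCore (f n : Nat) (acc : List Char) (c : Char)
    (h : c ∈ Nat.toDigitsCore 10 f n acc) : c ∈ acc ∨ ∃ d, d < 10 ∧ c = Nat.digitChar d := by
  induction f generalizing n acc with
  | zero => exact Or.inl h
  | succ f ih =>
    rw [Nat.toDigitsCore] at h
    split at h
    · rcases List.mem_cons.1 h with h1 | h1
      · exact Or.inr ⟨n % 10, Nat.mod_lt _ (by omega), h1⟩
      · exact Or.inl h1
    · rcases ih _ _ h with h1 | h1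
      · rcases List.mem_cons.1 h1 with h2 | h2
        · exact Or.inr ⟨n % 10, Nat.mod_lt _ (by omega), h2⟩
        · exact Or.inl h2
      · exact Or.inr h1

lemma toDigitsCore_length (f n : Nat) (acc : List Char) :
    acc.length < (Nat.toDigitsCore 10 (f + 1) n acc).length := by
  induction f generalizing n acc with
  | zero =>
    rw [Nat.toDigitsCore]
    split
    · simp
    · rw [Nat.toDigitsCore]; simp
  | succ f ih =>
    rw [Nat.toDigitsCore]
    split
    · simp
    · have := ih (n / 10) (Nat.digitChar (n % 10) :: acc)
      simp at this; omega

lemma dash_not_mem_toDigits (m : Nat) : '-' ∉ Nat.toDigits 10 m := by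
  intro h
  rcases mem_toDigitsCore _ _ _ _ h with h' | ⟨d, hd, he⟩
  · simp at h'
  · interval_cases d <;> simp_all [Nat.digitChar]

lemma toDigits_ne_nil (m : Nat) : Nat.toDigits 10 m ≠ [] := by
  have := toDigitsCore_length m m []
  intro h; rw [Nat.toDigits] at h; simp [h] at this

-- a palindromic int is nonnegative
lemma pal_nonneg (n : Int) (h : is_palindrome n = true) : 0 ≤ n := by
  by_contra hneg
  rw [not_le] at hneg
  rw [is_palindrome, PySem.Str.slice?_none_none_neg_one] at h
  have h1 : PySem.Int.toStr n = String.ofList (PySem.Int.toStr n).toList.reverse := by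
    simpa using (beq_iff_eq.mp h)
  have he : (PySem.Int.toStr n).toList.reverse = (PySem.Int.toStr n).toList := by
    conv_rhs => rw [h1]
    simp
  rw [PySem.Int.toList_toStr, PySem.Int.toChars, if_pos hneg] at he
  set d := Nat.toDigits 10 n.natAbs with hd
  have hne : d ≠ [] := toDigits_ne_nil _
  have hrev : d.reverse ++ ['-'] = '-' :: d := by simpa using he
  have hrn : d.reverse ≠ [] := by simpa using hne
  obtain ⟨c, cs, hc⟩ := List.exists_cons_of_ne_nil hrn
  rw [hc] at hrev
  have hcdash : c = '-' := by
    have := congrArg List.head? hrev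
    simpa using this
  have hmem : c ∈ d.reverse := hc ▸ List.mem_cons_self ..
  rw [List.mem_reverse] at hmem
  exact dash_not_mem_toDigits n.natAbs (hcdash ▸ hmem)

-- A's fold, characterised by filter + running max
lemma foldA (l : List Int) (acc : List Int) (m : Int) :
    l.foldl (fun (st : List Int × Int) number =>
      if is_palindrome number then
        let pl := st.1 ++ [number]
        if number > st.2 then (pl, number) else (pl, st.2)
      else st) (acc, m)
    = (acc ++ l.filter is_palindrome, (l.filter is_palindrome).foldl max m) := by
  induction l generalizing acc m with
  | nil => simp
  | cons x t ih =>
    by_cases hx : is_palindrome x = true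
    · rw [List.foldl_cons, List.filter_cons_of_pos hx]
      simp only [if_pos hx]
      have hstep : (if x > m then (acc ++ [x], x) else (acc ++ [x], m)) = (acc ++ [x], max m x) := by
        rcases lt_or_ge m x with h | h
        · rw [if_pos h, max_eq_right h.le]
        · rw [if_neg (not_lt.2 h), max_eq_left h]
      rw [hstep, ih]
      simp
    · rw [List.foldl_cons, List.filter_cons_of_neg (by exact hx), if_neg hx]
      exact ih acc m

-- the head of the descending-sorted list is the running max
lemma head_sorted_rev_eq_foldl_max (x : Int) (t : List Int) :
    PySem.List.pyGet? (PySem.List.sorted (x :: t) (fun y => y) true) 0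
      = some (t.foldl max x) := by
  cases hs : PySem.List.sorted (x :: t) (fun y => y) true with
  | nil =>
    have hlen := (PySem.List.sorted_perm (x :: t) (fun y => y) true).length_eq
    rw [hs] at hlen
    simp at hlen
  | cons m s =>
    have hmmem : m ∈ x :: t := by
      have := (PySem.List.sorted_perm (x :: t) (fun y => y) true).mem_iff (a := m)
      exact this.mp (hs ▸ List.mem_cons_self ..)
    have hmax : ∀ y ∈ x :: t, y ≤ m :=
      PySem.List.key_head_sorted_rev_ge (xs := x :: t) (key := fun y => y) hs
    have hF := PySem.List.le_foldl_max t x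
    have hFmem : t.foldl max x ∈ x :: t := by
      rcases PySem.List.foldl_max_mem t x with h | h
      · rw [h]; exact List.mem_cons_self ..
      · exact List.mem_cons_of_mem _ h
    have hFm : m = t.foldl max x := by
      apply le_antisymm
      · rcases List.mem_cons.1 hmmem with h | h
        · exact h ▸ hF.1
        · exact hF.2 m h
      · exact hmax _ hFmem
    simp [PySem.List.pyGet?, PySem.List.pyIdx?, hFm]

-- ===== VERDICT (by name: the statement is the Claim_ definition above) =====
theorem palindrome_count_max_spec : Claim_equal_palindrome_count_max := by
  intro numbers _
  unfold Spec_palindrome_count_max palindrome_count_max palindrome_count_max_alt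
  have hfilter_eq : numbers.filter (fun n =>
      some (PySem.Int.toStr n) == PySem.Str.slice? (PySem.Int.toStr n) none none (-1))
      = numbers.filter is_palindrome := rfl
  rw [foldA, hfilter_eq]
  cases hpal : numbers.filter is_palindrome with
  | nil => rfl
  | cons x t =>
    have hpx : is_palindrome x = true :=
      List.of_mem_filter (p := is_palindrome) (hpal ▸ List.mem_cons_self ..)
    have hx0 : 0 ≤ x := pal_nonneg x hpx
    have hle : x ≤ t.foldl max x := (PySem.List.le_foldl_max t x).1
    simp only [List.foldl_cons, List.nil_append]
    rw [max_eq_right (by omega : (-1 : Int) ≤ x)]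
    rw [if_neg (by simp only [beq_iff_eq]; omega)]
    rw [head_sorted_rev_eq_foldl_max]
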